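-- pv_equiv track=rewrite | github.com/Xukai-YE/enzytransfer | data_sources/mutation/step1.py | build_regex_pattern
-- ===== SOURCE A (Python) =====
-- from typing import Dict, List, Tuple, Optional, Any
--
-- def build_regex_pattern(mutations: List[Tuple[str, int, str]]) -> Tuple[str, int, int]:
--     """Build a regex pattern from mutations to locate the region in the sequence."""
--     if not mutations:
--         raise ValueError("No mutations provided")
--
--     # Sort by position
--     sorted_muts = sorted(mutations, key=lambda x: x[1])
--     min_pos = sorted_muts[0][1]
--     max_pos = sorted_muts[-1][1]
--
--     # Build pattern: use original amino acids at mutation positions, '.' for gaps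
--     pattern_parts = []
--     current_pos = min_pos
--
--     for orig_aa, pos, _ in sorted_muts:
--         gap = pos - current_pos
--         if gap > 0:
--             pattern_parts.append('.' * gap)
--         pattern_parts.append(orig_aa)
--         current_pos = pos + 1
--
--     pattern = ''.join(pattern_parts)
--     return pattern, min_pos, max_pos
-- ===== SOURCE B (Python) =====
-- from typing import Dict, List, Tuple, Optional, Any
--
-- def build_regex_pattern(mutations: List[Tuple[str, int, str]]) -> Tuple[str, int, int]:
--     """Build a regex pattern from mutations to locate the region in the sequence."""
--     if not mutations:
--         raise ValueError("No mutations provided")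
--
--     positions = [pos for _, pos, _ in mutations]
--     min_pos = min(positions)
--     max_pos = max(positions)
--
--     # Group original amino acids by position (insertion order of equal
--     # positions is the input order, matching a stable position sort).
--     by_pos: Dict[int, str] = {}
--     for orig_aa, pos, _ in mutations:
--         by_pos[pos] = by_pos.get(pos, '') + orig_aa
--
--     pattern = ''.join(by_pos.get(p, '.') for p in range(min_pos, max_pos + 1))
--     return pattern, min_pos, max_pos
-- ===== Notes on version B (the rewrite author's own statement) =====
-- stated objective: alternative
-- what changed: A sorts the mutations and walks them sequentially tracking current_pos to emit '.'-gap fillers; B never sorts: it takes min/max of the positions, groups the original amino acids by position in a dict built in one pass, and joins one dict lookup (default '.') per position of the dense range.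
import Mathlib
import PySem

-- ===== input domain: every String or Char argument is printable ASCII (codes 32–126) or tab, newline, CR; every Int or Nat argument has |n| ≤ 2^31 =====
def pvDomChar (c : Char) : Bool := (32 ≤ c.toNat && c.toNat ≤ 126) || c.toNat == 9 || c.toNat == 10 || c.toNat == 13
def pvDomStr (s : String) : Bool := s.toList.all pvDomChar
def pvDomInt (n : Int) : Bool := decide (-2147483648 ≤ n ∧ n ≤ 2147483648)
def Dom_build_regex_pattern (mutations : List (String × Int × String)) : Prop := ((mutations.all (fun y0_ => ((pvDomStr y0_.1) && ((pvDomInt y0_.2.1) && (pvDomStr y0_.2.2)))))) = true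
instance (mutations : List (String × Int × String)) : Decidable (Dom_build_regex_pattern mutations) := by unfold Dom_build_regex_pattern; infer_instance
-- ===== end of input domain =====

-- B replaces A's sorted gap-tracking pass by a position→string grouping dict and a dense
-- range join (no sort); return values agree on every non-empty input (objective: alternative).

-- ===== PORT A =====
-- Python A: sort by position, then walk the sorted list emitting '.'*gap fillers.
def build_regex_pattern (mutations : List (String × Int × String)) : String × Int × Int :=
  match PySem.List.sorted mutations (fun x => x.2.1) with
  | [] => ("", 0, 0)  -- Python raises ValueError("No mutations provided"); excluded by Pre_
  | m :: t =>
      let min_pos := m.2.1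
      let max_pos := ((m :: t).getLast (by simp)).2.1
      -- the for-loop over sorted_muts, state = (pattern_parts, current_pos)
      let r := (m :: t).foldl (fun (st : List String × Int) mu =>
          let gap := mu.2.1 - st.2
          ((if gap > 0 then st.1 ++ [String.ofList (List.replicate gap.toNat '.')] else st.1)
             ++ [mu.1],
           mu.2.1 + 1)) ([], min_pos)
      (PySem.Str.join "" r.1, min_pos, max_pos)
      -- String.ofList (List.replicate gap.toNat '.') is exactly Python's '.' * gap (gap > 0)

-- ===== PORT B =====
-- Python B (Source B): min/max of the positions, group orig_aa strings by position in a dict,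
-- then join one dict lookup (default '.') per position of the dense range.
def build_regex_pattern_alt (mutations : List (String × Int × String)) : String × Int × Int :=
  if mutations = [] then ("", 0, 0)  -- Python raises ValueError; excluded by Pre_
  else
    let positions := mutations.map (fun m => m.2.1)
    let min_pos := (PySem.List.min? positions (fun x => x)).getD 0  -- nonempty: min? is some
    let max_pos := (PySem.List.max? positions (fun x => x)).getD 0
    -- by_pos[pos] = by_pos.get(pos, '') + orig_aa   is Dict.modify pos "" (· ++ orig_aa)
    let by_pos := mutations.foldl
        (fun (d : PySem.Dict Int String) mu => d.modify mu.2.1 "" (· ++ mu.1))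
        PySem.Dict.empty
    let pattern := PySem.Str.join ""
        ((PySem.List.pyRange min_pos (max_pos + 1) 1).map (fun p => by_pos.getD p "."))
    (pattern, min_pos, max_pos)

-- ===== PRECONDITION & SPEC =====
-- Pre_ excludes only the empty list, on which Python A raises ValueError.
def Pre_build_regex_pattern (mutations : List (String × Int × String)) : Prop := mutations ≠ []
instance (mutations : List (String × Int × String)) : Decidable (Pre_build_regex_pattern mutations) := by unfold Pre_build_regex_pattern; infer_instance
def pvWitness_build_regex_pattern : (List (String × Int × String)) := [("A", 3, "G"), ("K", 1, "R"), ("Q", 3, "N")]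

def Spec_build_regex_pattern (mutations : List (String × Int × String)) (out : String × Int × Int) : Prop := out = build_regex_pattern_alt mutations
instance (mutations : List (String × Int × String)) (out : String × Int × Int) : Decidable (Spec_build_regex_pattern mutations out) := by unfold Spec_build_regex_pattern; infer_instance

-- ===== CLAIM (what is proved, stated in full; the proofs are below) =====
def Claim_equal_build_regex_pattern : Prop := ∀ (mutations : List (String × Int × String)), Dom_build_regex_pattern mutations → Pre_build_regex_pattern mutations → Spec_build_regex_pattern mutations (build_regex_pattern mutations)

-- ===== LEMMAS AND PROOFS =====


def pvGrp (l : List (String × Int × String)) (p : Int) : List (String × Int × String) :=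
  l.filter (fun m => m.2.1 == p)
def pvCell (l : List (String × Int × String)) (p : Int) : List Char :=
  if pvGrp l p = [] then ['.'] else ((pvGrp l p).map (fun m => m.1.toList)).flatten
def pvLoopA : Int → List (String × Int × String) → List Char
  | _, [] => []
  | c, mu :: t =>
      (if mu.2.1 - c > 0 then List.replicate (mu.2.1 - c).toNat '.' else [])
        ++ mu.1.toList ++ pvLoopA (mu.2.1 + 1) t
def pvStepA (st : List String × Int) (mu : String × Int × String) : List String × Int :=
  ((if mu.2.1 - st.2 > 0 then st.1 ++ [String.ofList (List.replicate (mu.2.1 - st.2).toNat '.')] else st.1)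
     ++ [mu.1], mu.2.1 + 1)

theorem pvFoldA_eq (l : List (String × Int × String)) : ∀ (parts : List String) (c : Int),
    ((l.foldl pvStepA (parts, c)).1.map String.toList).flatten
      = (parts.map String.toList).flatten ++ pvLoopA c l := by
  induction l with
  | nil => simp [pvLoopA]
  | cons mu t ih =>
      intro parts c
      simp only [List.foldl_cons, pvStepA, pvLoopA]
      rw [ih]
      by_cases h : c < mu.2.1 <;> simp [h]

theorem pvLoopA_group (p : Int) (r : List (String × Int × String)) :
    ∀ (g : List (String × Int × String)), (∀ m ∈ g, m.2.1 = p) →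
    pvLoopA (p + 1) (g ++ r) = (g.map (fun m => m.1.toList)).flatten ++ pvLoopA (p + 1) r := by
  intro g
  induction g with
  | nil => simp
  | cons mu g ih =>
      intro hg
      have hmu : mu.2.1 = p := hg mu (by simp)
      simp only [List.cons_append, pvLoopA, hmu]
      rw [ih (fun m hm => hg m (by simp [hm]))]
      simp

theorem pvDict_getD (l : List (String × Int × String)) : ∀ (d : PySem.Dict Int String) (p : Int),
    ((l.foldl (fun (d : PySem.Dict Int String) mu => d.modify mu.2.1 "" (· ++ mu.1)) d).getD p "").toList
      = (d.getD p "").toList ++ ((pvGrp l p).map (fun m => m.1.toList)).flatten := by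
  induction l with
  | nil => simp [pvGrp]
  | cons mu t ih =>
      intro d p
      simp only [List.foldl_cons]
      rw [ih]
      by_cases h : mu.2.1 = p
      · subst h
        rw [PySem.Dict.getD_modify_self]
        simp [pvGrp]
      · rw [PySem.Dict.getD_modify_of_ne _ _ _ (fun hp => h hp.symm)]
        simp [pvGrp, h]

theorem pvDict_cell (l : List (String × Int × String)) (p : Int) :
    ((l.foldl (fun (d : PySem.Dict Int String) mu => d.modify mu.2.1 "" (· ++ mu.1)) PySem.Dict.empty).getD p ".").toList
      = pvCell l p := by
  have hkeys := PySem.Dict.keys_foldl_modify_key l (fun mu => mu.2.1) ""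
      (fun d mu v => v ++ mu.1) (PySem.Dict.empty (κ := Int) (ν := String))
  set D := l.foldl (fun (d : PySem.Dict Int String) mu => d.modify mu.2.1 "" (· ++ mu.1)) PySem.Dict.empty with hD
  have hmem : D.contains p = true ↔ p ∈ l.map (fun mu => mu.2.1) := by
    rw [PySem.Dict.contains_iff_mem_keys, hkeys]
    rw [PySem.Set.mem_update]
    simp [PySem.Dict.empty, PySem.Dict.keys]
  by_cases h : pvGrp l p = []
  · have hnp : p ∉ l.map (fun mu => mu.2.1) := by
      intro hp
      simp only [List.mem_map] at hp
      obtain ⟨m, hm, hk⟩ := hp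
      have : m ∈ pvGrp l p := by simp [pvGrp, List.mem_filter, hm, hk]
      simp [h] at this
    have hcf : D.contains p = false := by
      rw [Bool.eq_false_iff]; intro hc; exact hnp (hmem.1 hc)
    have hget : D.get? p = none := by
      simp [PySem.Dict.contains, PySem.Dict.get?] at *
      exact fun a b hab => Ne.intro (hcf a b hab)
    simp [PySem.Dict.getD, hget, pvCell, h]
  · have hp : p ∈ l.map (fun mu => mu.2.1) := by
      obtain ⟨m, hm⟩ := List.exists_mem_of_ne_nil _ h
      simp only [pvGrp, List.mem_filter, beq_iff_eq] at hm
      exact List.mem_map.2 ⟨m, hm.1, hm.2⟩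
    have hc : D.contains p = true := hmem.2 hp
    have hsome : (D.get? p).isSome := by
      simp only [PySem.Dict.contains, List.any_eq_true] at hc
      obtain ⟨q, hq, hqp⟩ := hc
      simp only [PySem.Dict.get?, Option.isSome_map]
      rw [List.find?_isSome]
      exact ⟨q, hq, hqp⟩
    obtain ⟨v, hv⟩ := Option.isSome_iff_exists.1 hsome
    have h1 : D.getD p "." = v := by simp [PySem.Dict.getD, hv]
    have h2 : D.getD p "" = v := by simp [PySem.Dict.getD, hv]
    have := pvDict_getD l PySem.Dict.empty p
    rw [← hD, h2] at this
    simp only [pvCell, h]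
    rw [h1, this]
    simp [PySem.Dict.getD, PySem.Dict.get?, PySem.Dict.empty]

theorem pvFilter_insertBy (p : Int) (x : String × Int × String) :
    ∀ (ys : List (String × Int × String)), ys.Pairwise (fun a b => a.2.1 ≤ b.2.1) →
    (PySem.List.insertBy (fun a b => decide (a.2.1 < b.2.1)) x ys).filter (fun m => m.2.1 == p)
      = if x.2.1 == p then ys.filter (fun m => m.2.1 == p) ++ [x] else ys.filter (fun m => m.2.1 == p) := by
  intro ys
  induction ys with
  | nil =>
      intro _
      by_cases h : x.2.1 = p <;> simp [PySem.List.insertBy, List.filter, h]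
  | cons y ys ih =>
      intro hp
      by_cases hlt : x.2.1 < y.2.1
      · have : PySem.List.insertBy (fun a b => decide (a.2.1 < b.2.1)) x (y :: ys) = x :: y :: ys := by
          simp [PySem.List.insertBy, hlt]
        rw [this]
        by_cases hxp : x.2.1 = p
        · -- everything in y :: ys has key > p, so its filter is empty
          have hempty : (y :: ys).filter (fun m => m.2.1 == p) = [] := by
            rw [List.filter_eq_nil_iff]
            intro m hm
            have hym : p < m.2.1 := by
              rcases hm with _ | hm'
              · omega
              · have := (List.pairwise_cons.1 hp).1 m (by assumption)
                omega
            simp; omega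
          have hb : (x.2.1 == p) = true := beq_iff_eq.2 hxp
          rw [show List.filter (fun m => m.2.1 == p) (x :: y :: ys)
                = x :: List.filter (fun m => m.2.1 == p) (y :: ys) from by
              rw [List.filter_cons]; simp [hb], hempty, hb]
          simp
        · have hb : (x.2.1 == p) = false := by simp [hxp]
          rw [show List.filter (fun m => m.2.1 == p) (x :: y :: ys)
                = List.filter (fun m => m.2.1 == p) (y :: ys) from by
              rw [List.filter_cons]; simp [hb], hb]
          simp
      · have : PySem.List.insertBy (fun a b => decide (a.2.1 < b.2.1)) x (y :: ys)
            = y :: PySem.List.insertBy (fun a b => decide (a.2.1 < b.2.1)) x ys := by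
          simp [PySem.List.insertBy, hlt]
        rw [this]
        rw [List.filter_cons, List.filter_cons, ih (List.pairwise_cons.1 hp).2]
        by_cases hxp : x.2.1 = p <;> by_cases hyp : y.2.1 = p <;> simp [hxp, hyp]

def pvKeyF : (String × Int × String) → Int := fun x => x.2.1

theorem pvGrp_sorted (l : List (String × Int × String)) (p : Int) :
    pvGrp (PySem.List.sorted l (fun x => x.2.1)) p = pvGrp l p := by
  induction l using List.reverseRecOn with
  | nil => simp [pvGrp, PySem.List.sorted]
  | append_singleton l x ih =>
      have hsort : PySem.List.sorted (l ++ [x]) (fun m => m.2.1)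
          = PySem.List.insertBy (fun a b => decide (a.2.1 < b.2.1)) x (PySem.List.sorted l (fun m => m.2.1)) := by
        rw [PySem.List.sorted_eq_foldl_insertBy, PySem.List.sorted_eq_foldl_insertBy, List.foldl_append]
        simp
      unfold pvGrp
      rw [hsort, pvFilter_insertBy p x _ (PySem.List.sorted_pairwise l (fun m => m.2.1)),
          List.filter_append]
      unfold pvGrp at ih
      by_cases hxp : x.2.1 = p <;> simp [hxp, ih]

theorem pvDots (a b : Int) :
    (((PySem.List.pyRange a b).map (fun _ => (['.'] : List Char))).flatten)
      = List.replicate (b - a).toNat '.' := by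
  rw [PySem.List.pyRange_one]
  rw [List.map_map]
  have h0 : ((fun _ => (['.'] : List Char)) ∘ (fun k : Nat => a + (k : Int))) = fun _ => (['.'] : List Char) := rfl
  rw [h0, List.map_const', List.length_range, List.flatten_replicate_singleton]

theorem pvLoopA_eq (n : Nat) : ∀ (s : List (String × Int × String)), s.length ≤ n →
    ∀ (hne : s ≠ []), s.Pairwise (fun a b => a.2.1 ≤ b.2.1) →
    ∀ c : Int, (∀ m ∈ s, c ≤ m.2.1) →
    pvLoopA c s = ((PySem.List.pyRange c ((s.getLast hne).2.1 + 1)).map (pvCell s)).flatten := by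
  induction n with
  | zero =>
      intro s hlen hne _ c _
      exact absurd (List.length_eq_zero_iff.1 (Nat.le_zero.1 hlen)) hne
  | succ n ih =>
      intro s hlen hne hs c hc
      obtain ⟨mu, t, rfl⟩ : ∃ mu t, s = mu :: t := by
        cases s with
        | nil => exact absurd rfl hne
        | cons a b => exact ⟨a, b, rfl⟩
      have hcp : c ≤ mu.2.1 := hc mu (by simp)
      have hts : ∀ m ∈ t, mu.2.1 ≤ m.2.1 := (List.pairwise_cons.1 hs).1
      have hgr : t = t.takeWhile (fun m => m.2.1 == mu.2.1) ++ t.dropWhile (fun (m : String × Int × String) => m.2.1 == mu.2.1) :=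
        (List.takeWhile_append_dropWhile).symm
      set g' := t.takeWhile (fun m => m.2.1 == mu.2.1) with hg'
      set r := t.dropWhile (fun (m : String × Int × String) => m.2.1 == mu.2.1) with hrdef
      have hg'keys : ∀ m ∈ g', m.2.1 = mu.2.1 := by
        intro m hm
        have := List.mem_takeWhile_imp hm
        simpa using this
      have hrkeys : ∀ m ∈ r, mu.2.1 < m.2.1 := by
        intro m hm
        cases hr0 : r with
        | nil => rw [hr0] at hm; simp at hm
        | cons m0 r' =>
            have hm0t : m0 ∈ t := by
              have h4 : m0 ∈ t.dropWhile (fun (m : String × Int × String) => m.2.1 == mu.2.1) := by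
                rw [← hrdef, hr0]; simp
              exact List.Sublist.mem h4 (List.dropWhile_sublist (fun (m : String × Int × String) => m.2.1 == mu.2.1))
            have hm0ne : m0.2.1 ≠ mu.2.1 := by
              have hw : t.dropWhile (fun (m : String × Int × String) => m.2.1 == mu.2.1) ≠ [] := by
                rw [← hrdef, hr0]; simp
              have h5 := List.head_dropWhile_not (fun (m : String × Int × String) => m.2.1 == mu.2.1) hw
              have h6 : (t.dropWhile (fun (m : String × Int × String) => m.2.1 == mu.2.1)).head hw = m0 := by
                have : t.dropWhile (fun (m : String × Int × String) => m.2.1 == mu.2.1) = m0 :: r' := by rw [← hrdef, hr0]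
                simp [this]
              rw [h6] at h5
              simpa using h5
            have hm0 : mu.2.1 < m0.2.1 := lt_of_le_of_ne (hts m0 hm0t) (Ne.symm hm0ne)
            rw [hr0] at hm
            rcases hm with _ | hm'
            · exact hm0
            · have hpr : r.Pairwise (fun a b => a.2.1 ≤ b.2.1) :=
                List.Pairwise.sublist (List.dropWhile_sublist _) ((List.pairwise_cons.1 hs).2)
              rw [hr0] at hpr
              have := (List.pairwise_cons.1 hpr).1 m (by assumption)
              omega
      -- unfold the loop across the head group
      have hstep : pvLoopA c (mu :: t)
          = List.replicate (mu.2.1 - c).toNat '.'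
            ++ ((mu :: g').map (fun m => m.1.toList)).flatten ++ pvLoopA (mu.2.1 + 1) r := by
        show (if mu.2.1 - c > 0 then List.replicate (mu.2.1 - c).toNat '.' else [])
              ++ mu.1.toList ++ pvLoopA (mu.2.1 + 1) t = _
        have h1 : (if mu.2.1 - c > 0 then List.replicate (mu.2.1 - c).toNat '.' else [])
            = List.replicate (mu.2.1 - c).toNat '.' := by
          by_cases h : mu.2.1 - c > 0
          · rw [if_pos h]
          · have h2 : (mu.2.1 - c).toNat = 0 := by omega
            rw [if_neg h, h2, List.replicate_zero]
        rw [h1]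
        conv_lhs => rw [hgr]
        rw [pvLoopA_group mu.2.1 r g' hg'keys]
        simp [List.append_assoc]
      -- cells of the combined list
      have hgrp_p : pvGrp (mu :: t) mu.2.1 = mu :: g' := by
        unfold pvGrp
        rw [List.filter_cons_of_pos (by simp)]
        congr 1
        conv_lhs => rw [hgr]
        rw [List.filter_append]
        have h2 : r.filter (fun m => m.2.1 == mu.2.1) = [] := by
          rw [List.filter_eq_nil_iff]
          intro m hm
          have := hrkeys m hm
          simp; omega
        have h3 : g'.filter (fun m => m.2.1 == mu.2.1) = g' := by
          rw [List.filter_eq_self]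
          intro m hm
          simp [hg'keys m hm]
        rw [h2, h3, List.append_nil]
      have hcell_lt : ∀ q : Int, c ≤ q → q < mu.2.1 → pvCell (mu :: t) q = ['.'] := by
        intro q _ hq
        unfold pvCell
        have : pvGrp (mu :: t) q = [] := by
          unfold pvGrp
          rw [List.filter_eq_nil_iff]
          intro m hm
          have : mu.2.1 ≤ m.2.1 := by
            rcases hm with _ | hm'
            · omega
            · exact hts m (by assumption)
          simp; omega
        simp [this]
      have hcell_p : pvCell (mu :: t) mu.2.1 = ((mu :: g').map (fun m => m.1.toList)).flatten := by
        unfold pvCell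
        rw [hgrp_p]
        simp
      -- the first segment [c, mu.2.1 + 1) of the range
      have hseg1 : ((PySem.List.pyRange c (mu.2.1 + 1)).map (pvCell (mu :: t))).flatten
          = List.replicate (mu.2.1 - c).toNat '.' ++ ((mu :: g').map (fun m => m.1.toList)).flatten := by
        rw [PySem.List.pyRange_one_succ_right hcp]
        rw [List.map_append, List.flatten_append]
        congr 1
        · rw [show (PySem.List.pyRange c mu.2.1).map (pvCell (mu :: t))
                = (PySem.List.pyRange c mu.2.1).map (fun _ => (['.'] : List Char)) from
              List.map_congr_left (fun q hq => by
                have := (PySem.List.mem_pyRange_one).1 hq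
                exact hcell_lt q this.1 this.2)]
          exact pvDots c mu.2.1
        · simp [hcell_p]
      by_cases hr : r = []
      · -- single group: t = g', last position is mu.2.1
        have htg : t = g' := by rw [hgr, hr, List.append_nil]
        have hlast : ((mu :: t).getLast hne).2.1 = mu.2.1 := by
          rcases List.mem_cons.1 (List.getLast_mem hne) with h | h
          · rw [h]
          · exact hg'keys _ (htg ▸ h)
        rw [hstep, hlast, hseg1, hr]
        simp [pvLoopA]
      · -- further groups: recurse on r
        have hlast : (mu :: t).getLast hne = r.getLast hr := by
          have : mu :: t = (mu :: g') ++ r := by rw [List.cons_append, ← hgr]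
          rw [List.getLast_congr _ _ this]
          exact List.getLast_append_right hr
        have hM : mu.2.1 < ((mu :: t).getLast hne).2.1 := by
          rw [hlast]; exact hrkeys _ (List.getLast_mem hr)
        have hrlen : r.length ≤ n := by
          have := congrArg List.length hgr
          simp at this
          simp [this] at hlen
          omega
        have hrec := ih r hrlen hr
            (List.Pairwise.sublist (List.dropWhile_sublist _) ((List.pairwise_cons.1 hs).2))
            (mu.2.1 + 1) (fun m hm => by have := hrkeys m hm; omega)
        rw [PySem.List.pyRange_one_append c (mu.2.1 + 1) (((mu :: t).getLast hne).2.1 + 1)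
            (by omega) (by omega)]
        rw [List.map_append, List.flatten_append, hseg1]
        have hcell_gt : ((PySem.List.pyRange (mu.2.1 + 1) (((mu :: t).getLast hne).2.1 + 1)).map (pvCell (mu :: t)))
            = ((PySem.List.pyRange (mu.2.1 + 1) (((mu :: t).getLast hne).2.1 + 1)).map (pvCell r)) := by
          apply List.map_congr_left
          intro q hq
          have hq' := (PySem.List.mem_pyRange_one).1 hq
          unfold pvCell pvGrp
          have : (mu :: t).filter (fun m => m.2.1 == q) = r.filter (fun m => m.2.1 == q) := by
            conv_lhs => rw [show mu :: t = (mu :: g') ++ r from by rw [List.cons_append, ← hgr]]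
            rw [List.filter_append]
            have : (mu :: g').filter (fun m => m.2.1 == q) = [] := by
              rw [List.filter_eq_nil_iff]
              intro m hm
              have : m.2.1 = mu.2.1 := by
                rcases hm with _ | hm'
                · rfl
                · exact hg'keys _ (by assumption)
              simp; omega
            rw [this, List.nil_append]
          rw [this]
        rw [hcell_gt]
        have hlastk : (r.getLast hr).2.1 = ((mu :: t).getLast hne).2.1 := by rw [hlast]
        rw [hlastk] at hrec
        rw [hstep, ← hrec]

theorem pvIntercalate_nil (xss : List (List Char)) : List.intercalate [] xss = xss.flatten := by
  induction xss with
  | nil => simp [List.intercalate]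
  | cons x xss ih =>
      cases xss with
      | nil => simp [List.intercalate]
      | cons y yss =>
          simp only [List.intercalate, List.intersperse] at *
          simp_all

theorem pvJoin_toList (parts : List String) :
    (PySem.Str.join "" parts).toList = (parts.map String.toList).flatten := by
  rw [PySem.Str.toList_join]
  show PySem.Chars.join "".toList _ = _
  simp [PySem.Chars.join, pvIntercalate_nil]

theorem pvLe_getLast : ∀ (l : List (String × Int × String)) (hl : l ≠ []),
    l.Pairwise (fun a b => a.2.1 ≤ b.2.1) → ∀ x ∈ l, x.2.1 ≤ (l.getLast hl).2.1 := by
  intro l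
  induction l with
  | nil => intro h; exact absurd rfl h
  | cons y t ih =>
      intro _ hp x hx
      by_cases htne : t = []
      · subst htne
        rcases List.mem_cons.1 hx with h | h
        · simp [h]
        · simp at h
      · rw [List.getLast_cons htne]
        rcases List.mem_cons.1 hx with h | h
        · subst h
          exact (List.pairwise_cons.1 hp).1 _ (List.getLast_mem htne)
        · exact ih htne (List.pairwise_cons.1 hp).2 x h

theorem pvCell_sorted (l : List (String × Int × String)) (p : Int) :
    pvCell (PySem.List.sorted l (fun x => x.2.1)) p = pvCell l p := by
  unfold pvCell
  rw [pvGrp_sorted]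

theorem pv_main (mutations : List (String × Int × String)) (hpre : mutations ≠ []) :
    build_regex_pattern mutations = build_regex_pattern_alt mutations := by
  have hSne : PySem.List.sorted mutations (fun x => x.2.1) ≠ [] := by
    rw [Ne, PySem.List.sorted_eq_nil_iff]; exact hpre
  rcases hS : PySem.List.sorted mutations (fun x => x.2.1) with _ | ⟨m, t⟩
  · exact absurd hS hSne
  -- the three components
  have hmem_mut : ∀ x ∈ m :: t, x ∈ mutations := by
    intro x hx
    have : x ∈ PySem.List.sorted mutations (fun x => x.2.1) := by rw [hS]; exact hx
    exact (PySem.List.mem_sorted _ _ _ _).1 this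
  have hhead_le : ∀ y ∈ mutations, m.2.1 ≤ y.2.1 :=
    PySem.List.key_head_sorted_le mutations (fun x => x.2.1) hS
  have hpair : (m :: t).Pairwise (fun a b => a.2.1 ≤ b.2.1) := by
    rw [← hS]; exact PySem.List.sorted_pairwise mutations (fun x => x.2.1)
  -- min
  obtain ⟨v, hv⟩ : ∃ v, PySem.List.min? (mutations.map (fun m => m.2.1)) (fun x => x) = some v := by
    rcases h : PySem.List.min? (mutations.map (fun m => m.2.1)) (fun x => x) with _ | v
    · rw [PySem.List.min?_eq_none_iff] at h; simp [hpre] at h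
    · exact ⟨v, h⟩
  have hmin : v = m.2.1 := by
    have h1 : v ≤ m.2.1 :=
      PySem.List.min?_isMin hv _ (List.mem_map.2 ⟨m, hmem_mut m (by simp), rfl⟩)
    have h2 : m.2.1 ≤ v := by
      obtain ⟨m', hm', hk⟩ := List.mem_map.1 (PySem.List.min?_mem hv)
      rw [← hk]; exact hhead_le m' hm'
    omega
  -- max
  obtain ⟨w, hw⟩ : ∃ w, PySem.List.max? (mutations.map (fun m => m.2.1)) (fun x => x) = some w := by
    rcases h : PySem.List.max? (mutations.map (fun m => m.2.1)) (fun x => x) with _ | w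
    · rw [PySem.List.max?_eq_none_iff] at h; simp [hpre] at h
    · exact ⟨w, h⟩
  have hne' : (m :: t) ≠ [] := by simp
  have hmax : w = ((m :: t).getLast hne').2.1 := by
    have h1 : ((m :: t).getLast hne').2.1 ≤ w :=
      PySem.List.max?_isMax hw _ (List.mem_map.2 ⟨_, hmem_mut _ (List.getLast_mem hne'), rfl⟩)
    have h2 : w ≤ ((m :: t).getLast hne').2.1 := by
      obtain ⟨m', hm', hk⟩ := List.mem_map.1 (PySem.List.max?_mem hw)
      rw [← hk]
      have : m' ∈ m :: t := by
        have : m' ∈ PySem.List.sorted mutations (fun x => x.2.1) := (PySem.List.mem_sorted _ _ _ _).2 hm'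
        rw [hS] at this; exact this
      exact pvLe_getLast _ hne' hpair m' this
    omega
  -- the pattern strings
  have hA1 : (((m :: t).foldl (fun (st : List String × Int) mu =>
        ((if mu.2.1 - st.2 > 0 then st.1 ++ [String.ofList (List.replicate (mu.2.1 - st.2).toNat '.')] else st.1)
           ++ [mu.1], mu.2.1 + 1)) ([], m.2.1)).1.map String.toList).flatten
      = pvLoopA m.2.1 (m :: t) := by
    show ((List.foldl pvStepA ([], m.2.1) (m :: t)).1.map String.toList).flatten = _
    rw [pvFoldA_eq (m :: t) [] m.2.1]
    simp
  have hloop := pvLoopA_eq (m :: t).length (m :: t) le_rfl hne' hpair m.2.1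
      (fun x hx => hhead_le x (hmem_mut x hx))
  have hcells : ((PySem.List.pyRange m.2.1 (((m :: t).getLast hne').2.1 + 1)).map (pvCell (m :: t)))
      = ((PySem.List.pyRange m.2.1 (((m :: t).getLast hne').2.1 + 1)).map
          (fun p => ((mutations.foldl
            (fun (d : PySem.Dict Int String) mu => d.modify mu.2.1 "" (· ++ mu.1))
            PySem.Dict.empty).getD p ".").toList)) := by
    apply List.map_congr_left
    intro q _
    rw [pvDict_cell, ← hS]
    exact pvCell_sorted mutations q
  -- assemble
  rw [build_regex_pattern.eq_def, build_regex_pattern_alt.eq_def, hS]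
  simp only [if_neg hpre, hv, hw, Option.getD_some, hmin, hmax]
  refine Prod.ext ?_ rfl
  show PySem.Str.join "" _ = PySem.Str.join "" _
  apply String.toList_inj.1
  rw [pvJoin_toList, pvJoin_toList, hA1, hloop, List.map_map, hcells]
  rfl

-- ===== VERDICT (by name: the statement is the Claim_ definition above) =====
theorem build_regex_pattern_spec : Claim_equal_build_regex_pattern := by
  intro mutations _ hpre
  unfold Spec_build_regex_pattern
  exact pv_main mutations hpre
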